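-- pv_equiv track=rewrite | github.com/Tsovak/advent-of-code | src/2024/day11/1/solution.py | blinking
-- ===== SOURCE A (Python) =====
-- def blinking(numbers: list[int], n: int) -> list[int]:
--     def split(number: int) -> list[int]:
--         if number == 0:
--             return [1]
--
--         number_str = str(number)
--         if len(number_str) % 2 == 0:
--             half = len(number_str) // 2
--             return [int(number_str[:half]), int(number_str[half:])]
--
--         return [number * 2024]
--
--     if n == 0:
--         return numbers
--
--     new_numbers = []
--     for _, v in enumerate(numbers):
--         new_numbers.extend(split(v))
--
--     return blinking(new_numbers, n - 1)
-- ===== SOURCE B (Python) =====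
-- def blinking(numbers: list[int], n: int) -> list[int]:
--     current = numbers
--     for _ in range(n):
--         nxt = []
--         for v in current:
--             if v == 0:
--                 nxt.append(1)
--                 continue
--             s = str(v)
--             half, odd = divmod(len(s), 2)
--             if odd:
--                 nxt.append(v * 2024)
--             else:
--                 nxt.append(int(s[:half]))
--                 nxt.append(int(s[half:]))
--         current = nxt
--     return current
-- ===== Notes on version B (the rewrite author's own statement) =====
-- stated objective: simpler
-- what changed: Replaces A's recursion on n (with an inner helper function and enumerate) by a flat iterative loop that rebuilds the stone list n times with the split rule inlined, avoiding n stack frames and the unused enumerate index.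
-- outside the precondition, e.g. on blinking([-12], 1): A returns [-24288], B returns [-24288]
import Mathlib
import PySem

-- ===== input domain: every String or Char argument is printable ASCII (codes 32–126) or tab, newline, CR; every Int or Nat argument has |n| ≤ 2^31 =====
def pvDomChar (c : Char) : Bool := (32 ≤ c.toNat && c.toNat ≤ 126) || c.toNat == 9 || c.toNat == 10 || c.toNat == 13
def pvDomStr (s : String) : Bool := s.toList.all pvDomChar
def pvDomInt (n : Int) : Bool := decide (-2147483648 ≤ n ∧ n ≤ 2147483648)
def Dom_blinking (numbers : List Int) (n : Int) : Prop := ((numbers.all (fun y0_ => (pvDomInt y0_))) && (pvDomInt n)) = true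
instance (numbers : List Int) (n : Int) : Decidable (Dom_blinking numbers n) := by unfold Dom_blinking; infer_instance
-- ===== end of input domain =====

-- B replaces A's recursion on n (with an inner helper and enumerate) by one iterative loop that
-- rebuilds the list n times with the split rule inlined; objective: simpler (same asymptotic cost).


-- ===== PORT A =====
-- A's inner 'split'.  int(...) on a slice is PySem.Int.ofChars?; its 'none' case (Python's
-- ValueError, reachable only for negative stones) is defaulted with getD 0 — outside Pre_.
def pySplitStone (number : Int) : List Int :=
  if number = 0 then [1]
  else
    let numberStr := PySem.Int.toChars number
    if numberStr.length % 2 = 0 then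
      let half := numberStr.length / 2
      [(PySem.Int.ofChars? (PySem.List.slice numberStr none (some (half : Int)))).getD 0,
       (PySem.Int.ofChars? (PySem.List.slice numberStr (some (half : Int)) none)).getD 0]
    else
      [number * 2024]

-- A's recursion on n, with Nat fuel n.toNat (exact for 0 ≤ n; Python diverges for n < 0, outside Pre_).
def blinkingGo (numbers : List Int) (n : Int) (fuel : Nat) : List Int :=
  if n = 0 then numbers
  else
    let newNumbers := (PySem.List.enumerate numbers 0).foldl (fun acc p => acc ++ pySplitStone p.2) []
    match fuel with
    | 0 => newNumbers
    | f + 1 => blinkingGo newNumbers (n - 1) f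

def blinking (numbers : List Int) (n : Int) : List Int :=
  blinkingGo numbers n n.toNat

-- ===== PORT B =====
def blinking_alt (numbers : List Int) (n : Int) : List Int :=
  (List.range n.toNat).foldl (fun current _ =>
    current.foldl (fun nxt v =>
      if v = 0 then nxt ++ [1]
      else
        let s := PySem.Int.toChars v
        let half := s.length / 2
        let odd := s.length % 2
        if odd ≠ 0 then nxt ++ [v * 2024]
        else
          (nxt ++ [(PySem.Int.ofChars? (PySem.List.slice s none (some (half : Int)))).getD 0])
              ++ [(PySem.Int.ofChars? (PySem.List.slice s (some (half : Int)) none)).getD 0]) []) numbers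

-- ===== PRECONDITION & SPEC =====
-- Pre_ excludes n < 0, on which A recurses without bound (RecursionError), and — for n ≥ 1 —
-- negative stones: A (and B alike) slices str(v) through the minus sign, and whether int() then
-- raises ValueError depends on how digit-length parity evolves across iterations, which is not a
-- closed-form condition; on the excluded negative inputs where A does return, B returns the same value.
def Pre_blinking (numbers : List Int) (n : Int) : Prop :=
  0 ≤ n ∧ (n = 0 ∨ ∀ x ∈ numbers, 0 ≤ x)
instance (numbers : List Int) (n : Int) : Decidable (Pre_blinking numbers n) := by
  unfold Pre_blinking; infer_instance

def pvWitness_blinking : List Int × Int := ([0, 1, 10, 99, 999, 2024], 3)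

def Spec_blinking (numbers : List Int) (n : Int) (out : List Int) : Prop := out = blinking_alt numbers n
instance (numbers : List Int) (n : Int) (out : List Int) : Decidable (Spec_blinking numbers n out) := by unfold Spec_blinking; infer_instance

-- ===== CLAIM (what is proved, stated in full; the proofs are below) =====
def Claim_equal_blinking : Prop := ∀ (numbers : List Int) (n : Int), Dom_blinking numbers n → Pre_blinking numbers n → Spec_blinking numbers n (blinking numbers n)

-- ===== LEMMAS AND PROOFS =====

-- One blink, the common recurrence of both programs.
def pvBlinkOnce (l : List Int) : List Int :=
  l.foldl (fun acc v => acc ++ pySplitStone v) []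

theorem pvEnumFoldl (l : List Int) (s : Int) (acc : List Int) :
    (PySem.List.enumerate l s).foldl (fun acc p => acc ++ pySplitStone p.2) acc =
      l.foldl (fun acc v => acc ++ pySplitStone v) acc := by
  induction l generalizing s acc with
  | nil => simp [PySem.List.enumerate_nil]
  | cons x xs ih => simp [PySem.List.enumerate_cons, List.foldl_cons, ih]

-- B's inlined per-stone step produces exactly A's split.
theorem pvStepEq (acc : List Int) (v : Int) :
    (if v = 0 then acc ++ [1]
     else
       let s := PySem.Int.toChars v
       let half := s.length / 2
       let odd := s.length % 2
       if odd ≠ 0 then acc ++ [v * 2024]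
       else
         (acc ++ [(PySem.Int.ofChars? (PySem.List.slice s none (some (half : Int)))).getD 0])
             ++ [(PySem.Int.ofChars? (PySem.List.slice s (some (half : Int)) none)).getD 0]) =
      acc ++ pySplitStone v := by
  by_cases h0 : v = 0
  · simp [h0, pySplitStone]
  · by_cases hpar : (PySem.Int.toChars v).length % 2 = 0
    · simp [h0, pySplitStone, hpar]
    · simp [h0, pySplitStone, hpar]

theorem pvInnerFoldl (l acc : List Int) :
    l.foldl (fun nxt v =>
      if v = 0 then nxt ++ [1]
      else
        let s := PySem.Int.toChars v
        let half := s.length / 2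
        let odd := s.length % 2
        if odd ≠ 0 then nxt ++ [v * 2024]
        else
          (nxt ++ [(PySem.Int.ofChars? (PySem.List.slice s none (some (half : Int)))).getD 0])
              ++ [(PySem.Int.ofChars? (PySem.List.slice s (some (half : Int)) none)).getD 0]) acc =
      l.foldl (fun acc v => acc ++ pySplitStone v) acc := by
  simp only [pvStepEq]

-- A's fuelled recursion computes the k-fold blink when the counter is the (nonnegative) fuel.
theorem pvGoEq (k : Nat) (numbers : List Int) :
    blinkingGo numbers (k : Int) k = pvBlinkOnce^[k] numbers := by
  induction k generalizing numbers with
  | zero => simp [blinkingGo]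
  | succ m ih =>
      rw [blinkingGo]
      have hk : ((m + 1 : Nat) : Int) ≠ 0 := by omega
      simp only [hk, if_false]
      have h1 : ((m + 1 : Nat) : Int) - 1 = (m : Int) := by push_cast; ring
      rw [pvEnumFoldl, h1, ih]
      rw [Function.iterate_succ_apply]
      rfl

-- B's outer loop computes the same k-fold blink.
theorem pvAltEq (k : Nat) (numbers : List Int) :
    (List.range k).foldl (fun current _ =>
      current.foldl (fun nxt v =>
        if v = 0 then nxt ++ [1]
        else
          let s := PySem.Int.toChars v
          let half := s.length / 2
          let odd := s.length % 2
          if odd ≠ 0 then nxt ++ [v * 2024]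
          else
            (nxt ++ [(PySem.Int.ofChars? (PySem.List.slice s none (some (half : Int)))).getD 0])
                ++ [(PySem.Int.ofChars? (PySem.List.slice s (some (half : Int)) none)).getD 0]) []) numbers =
      pvBlinkOnce^[k] numbers := by
  induction k with
  | zero => rfl
  | succ m ih =>
      rw [List.range_succ, List.foldl_append, ih, List.foldl_cons, List.foldl_nil,
        Function.iterate_succ_apply', pvInnerFoldl]
      rfl

-- ===== VERDICT (by name: the statement is the Claim_ definition above) =====
theorem blinking_spec : Claim_equal_blinking := by
  intro numbers n _ hpre
  have h1 : 0 ≤ n := hpre.1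
  have hn : n = ((n.toNat : Nat) : Int) := by omega
  unfold Spec_blinking blinking blinking_alt
  rw [hn, Int.toNat_natCast, pvGoEq, pvAltEq]
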